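-- pv_equiv track=rewrite | github.com/mvs5465-test/space-cadet | src/space_cadet/nasa_import.py | pick_image_link
-- ===== SOURCE A (Python) =====
-- def pick_image_link(links: list[dict[str, object]]) -> str:
--     """Pick a preferred downloadable image URL."""
--     preferred_suffixes = ("~medium.jpg", "~large.jpg", "~orig.jpg", ".jpg", ".png")
--     hrefs = [link["href"] for link in links if link.get("render") == "image"]
--     for suffix in preferred_suffixes:
--         for href in hrefs:
--             if href.endswith(suffix):
--                 return href
--     if not hrefs:
--         raise ValueError("No downloadable image links found in NASA response")
--     return hrefs[0]
-- ===== SOURCE B (Python) =====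
-- def pick_image_link(links: list[dict[str, object]]) -> str:
--     """Pick a preferred downloadable image URL."""
--     preferred_suffixes = ("~medium.jpg", "~large.jpg", "~orig.jpg", ".jpg", ".png")
--     n = len(preferred_suffixes)
--     best = None
--     best_rank = n + 1
--     for link in links:
--         if link.get("render") == "image":
--             href = link["href"]
--             r = next((i for i, s in enumerate(preferred_suffixes) if href.endswith(s)), n)
--             if r < best_rank:
--                 best, best_rank = href, r
--     if best is None:
--         raise ValueError("No downloadable image links found in NASA response")
--     return best
-- ===== Notes on version B (the rewrite author's own statement) =====
-- stated objective: alternative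
-- what changed: Replaces A's suffix-major nested scan (one full pass over hrefs per suffix) with a single href-major pass that computes each href's suffix rank once and keeps a running strict minimum, so the earliest href of best rank wins and the no-match case falls out as hrefs[0].
import Mathlib
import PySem

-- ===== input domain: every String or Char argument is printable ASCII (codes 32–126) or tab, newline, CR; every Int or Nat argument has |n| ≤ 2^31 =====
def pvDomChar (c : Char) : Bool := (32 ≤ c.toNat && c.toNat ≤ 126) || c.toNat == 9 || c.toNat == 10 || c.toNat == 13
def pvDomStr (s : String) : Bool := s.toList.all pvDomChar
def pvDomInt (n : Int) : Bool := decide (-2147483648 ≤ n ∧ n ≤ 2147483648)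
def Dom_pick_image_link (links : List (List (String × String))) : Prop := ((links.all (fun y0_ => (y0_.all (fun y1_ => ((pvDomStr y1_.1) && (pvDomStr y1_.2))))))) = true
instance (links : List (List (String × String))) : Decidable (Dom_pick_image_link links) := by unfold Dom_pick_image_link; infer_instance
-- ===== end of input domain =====

-- Alternative one-pass strategy in B: rank each href once, keep a strict running minimum.
-- Equivalence of RETURN values only; both Pythons raise the same exceptions (excluded by Pre_).

-- ===== PORT A =====
-- hrefs comprehension: link.get("render") == "image", link["href"] (getD "" is junk; KeyError excluded by Pre_)
def pvHrefs (links : List (List (String × String))) : List String :=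
  (links.filter (fun l => (PySem.Dict.ofList l).get? "render" == some "image")).map
    (fun l => ((PySem.Dict.ofList l).get? "href").getD "")

def pvSuffixes : List String := ["~medium.jpg", "~large.jpg", "~orig.jpg", ".jpg", ".png"]

-- A's nested loops: for suffix in preferred_suffixes: for href in hrefs: if href.endswith(suffix): return href
def pvLoopA (sufs : List String) (hrefs : List String) : Option String :=
  match sufs with
  | [] => none
  | s :: rest =>
    match hrefs.find? (fun h => PySem.Str.endswith h s) with
    | some h => some h
    | none => pvLoopA rest hrefs

def pick_image_link (links : List (List (String × String))) : String :=
  let hrefs := pvHrefs links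
  match pvLoopA pvSuffixes hrefs with
  | some h => h
  | none =>
    match hrefs with
    | [] => ""            -- Python raises ValueError here; excluded by Pre_
    | h0 :: _ => h0       -- return hrefs[0]

-- ===== PORT B =====
-- rank(h): for i, s in enumerate(preferred_suffixes): if h.endswith(s): return i; return len(...)
def pvRank (sufs : List String) (h : String) : Nat :=
  match sufs with
  | [] => 0
  | s :: rest => if PySem.Str.endswith h s then 0 else 1 + pvRank rest h

-- loop body: r = rank of href; keep the strictly better candidate
def pvStepB (st : Option String × Nat) (href : String) : Option String × Nat :=
  let r := pvRank pvSuffixes href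
  if r < st.2 then (some href, r) else st

def pick_image_link_alt (links : List (List (String × String))) : String :=
  let res := links.foldl
    (fun (st : Option String × Nat) link =>
      if (PySem.Dict.ofList link).get? "render" == some "image" then
        pvStepB st (((PySem.Dict.ofList link).get? "href").getD "")
      else st)
    (none, pvSuffixes.length + 1)
  match res.1 with
  | some b => b
  | none => ""            -- Python raises ValueError here; excluded by Pre_

-- ===== PRECONDITION & SPEC =====
-- Pre_ excludes exactly the inputs where A raises: hrefs empty (ValueError) or an image link
-- missing the "href" key (KeyError). B raises the identical exceptions there.
-- (getD with the non-"image" default "?" models Python's link.get("render") == "image" with the key possibly absent)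
def Pre_pick_image_link (links : List (List (String × String))) : Prop :=
  (∀ l ∈ links, (PySem.Dict.ofList l).getD "render" "?" = "image" → ((PySem.Dict.ofList l).get? "href").isSome) ∧
  (∃ l ∈ links, (PySem.Dict.ofList l).getD "render" "?" = "image")
instance (links : List (List (String × String))) : Decidable (Pre_pick_image_link links) := by
  unfold Pre_pick_image_link; infer_instance

def pvWitness_pick_image_link : (List (List (String × String))) :=
  [[("render", "image"), ("href", "photo~orig.jpg")]]

def Spec_pick_image_link (links : List (List (String × String))) (out : String) : Prop := out = pick_image_link_alt links
instance (links : List (List (String × String))) (out : String) : Decidable (Spec_pick_image_link links out) := by unfold Spec_pick_image_link; infer_instance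

-- ===== CLAIM (what is proved, stated in full; the proofs are below) =====
def Claim_equal_pick_image_link : Prop := ∀ (links : List (List (String × String))), Dom_pick_image_link links → Pre_pick_image_link links → Spec_pick_image_link links (pick_image_link links)

-- ===== LEMMAS AND PROOFS =====

-- proof-side reference: the strict-minimum scan without the carried rank
def pvPickMin (b : String) (t : List String) : String :=
  match t with
  | [] => b
  | h :: rest => if pvRank pvSuffixes h < pvRank pvSuffixes b then pvPickMin h rest else pvPickMin b rest

-- minimum rank over a list, defaulting to |sufs|
def pvMinr (sufs : List String) (t : List String) : Nat :=
  (t.map (pvRank sufs)).foldr Nat.min sufs.length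

theorem pvRank_le (sufs : List String) (h : String) : pvRank sufs h ≤ sufs.length := by
  induction sufs with
  | nil => simp [pvRank]
  | cons s rest ih =>
    simp only [pvRank, List.length_cons]
    split <;> omega

theorem pvMinr_nil (sufs : List String) : pvMinr sufs [] = sufs.length := rfl

theorem pvMinr_cons (sufs : List String) (x : String) (xs : List String) :
    pvMinr sufs (x :: xs) = Nat.min (pvRank sufs x) (pvMinr sufs xs) := rfl

theorem pvMinCases (a b : Nat) : (Nat.min a b = a ∧ a ≤ b) ∨ (Nat.min a b = b ∧ b ≤ a) := by
  rcases Nat.le_total a b with h | h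
  · exact Or.inl ⟨Nat.min_eq_left h, h⟩
  · exact Or.inr ⟨Nat.min_eq_right h, h⟩

theorem pvMinr_shift (s : String) (sufs : List String) (xs : List String)
    (hall : ∀ h ∈ xs, PySem.Str.endswith h s = false) :
    pvMinr (s :: sufs) xs = 1 + pvMinr sufs xs := by
  induction xs with
  | nil => simp [pvMinr]; omega
  | cons x t ih =>
    have hx := hall x (by simp)
    have ht : ∀ h ∈ t, PySem.Str.endswith h s = false := fun h hm => hall h (by simp [hm])
    have hrx : pvRank (s :: sufs) x = 1 + pvRank sufs x := by
      simp only [pvRank]; rw [if_neg (by rw [hx]; simp)]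
    rw [pvMinr_cons, pvMinr_cons, ih ht, hrx]
    rcases pvMinCases (1 + pvRank sufs x) (1 + pvMinr sufs t) with ⟨he1, hl1⟩ | ⟨he1, hl1⟩ <;>
      rcases pvMinCases (pvRank sufs x) (pvMinr sufs t) with ⟨he2, hl2⟩ | ⟨he2, hl2⟩ <;> omega

theorem pvMinr_le_of_mem (sufs : List String) (h : String) (xs : List String) (hm : h ∈ xs) :
    pvMinr sufs xs ≤ pvRank sufs h := by
  induction xs with
  | nil => simp at hm
  | cons y t iht =>
    rw [pvMinr_cons]
    rcases List.mem_cons.mp hm with h1 | h2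
    · subst h1; exact Nat.min_le_left _ _
    · exact le_trans (Nat.min_le_right _ _) (iht h2)

theorem pvLoopA_cons (sufs : List String) (x : String) (xs : List String) :
    pvLoopA sufs (x :: xs) =
      if pvRank sufs x < sufs.length ∧ pvRank sufs x ≤ pvMinr sufs xs then some x
      else pvLoopA sufs xs := by
  induction sufs with
  | nil => simp [pvLoopA, pvRank]
  | cons s rest ih =>
    by_cases hx : PySem.Str.endswith x s = true
    · have hr : pvRank (s :: rest) x = 0 := by
        simp only [pvRank]; rw [if_pos hx]
      have hL : pvLoopA (s :: rest) (x :: xs) = some x := by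
        simp only [pvLoopA]
        rw [List.find?_cons_of_pos (p := fun h => PySem.Str.endswith h s) (by exact hx)]
      rw [hL, if_pos ⟨by rw [hr]; simp, by rw [hr]; exact Nat.zero_le _⟩]
    · have hx' : PySem.Str.endswith x s = false := by
        cases hval : PySem.Str.endswith x s
        · rfl
        · exact absurd hval hx
      have hr : pvRank (s :: rest) x = 1 + pvRank rest x := by
        simp only [pvRank]; rw [if_neg hx]
      have hL0 : pvLoopA (s :: rest) (x :: xs) =
          (match xs.find? (fun h => PySem.Str.endswith h s) with
           | some h => some h
           | none => pvLoopA rest (x :: xs)) := by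
        simp only [pvLoopA]
        rw [List.find?_cons_of_neg (p := fun h => PySem.Str.endswith h s) (by exact hx)]
      cases hfind : xs.find? (fun h => PySem.Str.endswith h s) with
      | some h =>
        -- some later href matches the first suffix: rank 0 beats x, condition false
        have hmem := List.mem_of_find?_eq_some hfind
        have hends : PySem.Str.endswith h s = true := by
          have hh := List.find?_some hfind
          exact hh
        have hminr : pvMinr (s :: rest) xs = 0 := by
          have hle := pvMinr_le_of_mem (s :: rest) h xs hmem
          have hrh : pvRank (s :: rest) h = 0 := by
            simp only [pvRank]; rw [if_pos hends]
          omega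
        have hcond : ¬ (pvRank (s :: rest) x < (s :: rest).length ∧ pvRank (s :: rest) x ≤ pvMinr (s :: rest) xs) := by
          rw [hminr, hr]; omega
        have hR : pvLoopA (s :: rest) xs = some h := by
          simp only [pvLoopA]
          rw [hfind]
        rw [hL0, hfind, if_neg hcond, hR]
      | none =>
        have hall : ∀ h ∈ xs, PySem.Str.endswith h s = false := by
          intro h hm
          have := List.find?_eq_none.mp hfind h hm
          cases hval : PySem.Str.endswith h s
          · rfl
          · exact absurd hval this
        have hshift := pvMinr_shift s rest xs hall
        have hA' : pvLoopA (s :: rest) xs = pvLoopA rest xs := by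
          simp only [pvLoopA]
          rw [hfind]
        rw [hL0, hfind]
        simp only []
        rw [ih, hA']
        have hiff : (pvRank rest x < rest.length ∧ pvRank rest x ≤ pvMinr rest xs) ↔
               (pvRank (s :: rest) x < (s :: rest).length ∧ pvRank (s :: rest) x ≤ pvMinr (s :: rest) xs) := by
          rw [hr, hshift]
          simp only [List.length_cons]
          omega
        split_ifs with h1 h2 h2 <;> first | rfl | (exact absurd (hiff.mp h1) h2) | (exact absurd (hiff.mpr h2) h1)

theorem pvMinr_le_len (sufs : List String) (xs : List String) : pvMinr sufs xs ≤ sufs.length := by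
  induction xs with
  | nil => simp [pvMinr_nil]
  | cons y t iht => rw [pvMinr_cons]; exact le_trans (Nat.min_le_right _ _) iht

theorem pvLoopA_none_iff (sufs : List String) (t : List String) :
    pvLoopA sufs t = none ↔ sufs.length ≤ pvMinr sufs t := by
  induction t with
  | nil => simp [pvMinr_nil]; induction sufs with
    | nil => simp [pvLoopA]
    | cons s rest ih => simp [pvLoopA, List.find?, ih]
  | cons x xs ih =>
    rw [pvLoopA_cons, pvMinr_cons]
    have hle := pvRank_le sufs x
    split_ifs with hc
    · constructor
      · intro h; cases h
      · intro h
        rcases pvMinCases (pvRank sufs x) (pvMinr sufs xs) with ⟨he, _⟩ | ⟨he, hl⟩ <;> omega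
    · rw [ih]
      have hle2 : pvMinr sufs xs ≤ sufs.length := pvMinr_le_len sufs xs
      rcases pvMinCases (pvRank sufs x) (pvMinr sufs xs) with ⟨he, hl⟩ | ⟨he, hl⟩ <;>
        constructor <;> intro h <;> omega

theorem pvA_eq_pickMin (t : List String) : ∀ b : String,
    (match pvLoopA pvSuffixes (b :: t) with
     | some h => h
     | none => b) = pvPickMin b t := by
  induction t with
  | nil =>
    intro b
    rw [pvLoopA_cons]
    have h0 : pvMinr pvSuffixes ([] : List String) = pvSuffixes.length := pvMinr_nil _
    have hnone : pvLoopA pvSuffixes [] = none := rfl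
    split_ifs with hc
    · rfl
    · rw [hnone]
      rfl
  | cons x xs ih =>
    intro b
    rw [pvLoopA_cons]
    have hbx : pvMinr pvSuffixes (x :: xs) = Nat.min (pvRank pvSuffixes x) (pvMinr pvSuffixes xs) := pvMinr_cons _ _ _
    have hlb := pvRank_le pvSuffixes b
    have hlx := pvRank_le pvSuffixes x
    simp only [pvPickMin]
    split_ifs with hc hlt hlt
    · -- b wins outright: rank b ≤ rank x contradicts rank x < rank b
      exfalso; rw [hbx] at hc
      rcases pvMinCases (pvRank pvSuffixes x) (pvMinr pvSuffixes xs) with ⟨he, hl⟩ | ⟨he, hl⟩ <;> omega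
    · -- b chosen, and rank x ≥ rank b: reduce to (b, xs)
      rw [hbx] at hc
      have : pvLoopA pvSuffixes (b :: xs) = some b := by
        rw [pvLoopA_cons]
        rw [if_pos ⟨hc.1, by
          rcases pvMinCases (pvRank pvSuffixes x) (pvMinr pvSuffixes xs) with ⟨he, hl⟩ | ⟨he, hl⟩ <;> omega⟩]
      have := ih b
      rw [this.symm, ‹pvLoopA pvSuffixes (b :: xs) = some b›]
    · -- rank x < rank b: x (or something in xs) beats b; reduce to (x, xs)
      have hbxs : pvLoopA pvSuffixes (x :: xs) ≠ none := by
        rw [Ne, pvLoopA_none_iff, hbx]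
        intro h
        rcases pvMinCases (pvRank pvSuffixes x) (pvMinr pvSuffixes xs) with ⟨he, hl⟩ | ⟨he, hl⟩ <;> omega
      cases hA : pvLoopA pvSuffixes (x :: xs) with
      | none => exact absurd hA hbxs
      | some h =>
        have hx2 := ih x
        rw [hA] at hx2
        exact hx2
    · -- rank b ≤ rank x, b not immediately chosen: drop x on both sides
      rw [pvLoopA_cons]
      have hcx : ¬ (pvRank pvSuffixes x < pvSuffixes.length ∧ pvRank pvSuffixes x ≤ pvMinr pvSuffixes xs) := by
        intro ⟨h1, h2⟩
        rw [hbx] at hc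
        push Not at hlt
        rcases pvMinCases (pvRank pvSuffixes x) (pvMinr pvSuffixes xs) with ⟨he, hl⟩ | ⟨he, hl⟩ <;>
          exact hc ⟨by omega, by omega⟩
      rw [if_neg hcx]
      have : pvLoopA pvSuffixes (b :: xs) =
          if pvRank pvSuffixes b < pvSuffixes.length ∧ pvRank pvSuffixes b ≤ pvMinr pvSuffixes xs then some b
          else pvLoopA pvSuffixes xs := pvLoopA_cons _ _ _
      have hcb : ¬ (pvRank pvSuffixes b < pvSuffixes.length ∧ pvRank pvSuffixes b ≤ pvMinr pvSuffixes xs) := by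
        intro ⟨h1, h2⟩
        rw [hbx] at hc
        push Not at hlt
        rcases pvMinCases (pvRank pvSuffixes x) (pvMinr pvSuffixes xs) with ⟨he, hl⟩ | ⟨he, hl⟩ <;>
          exact hc ⟨h1, by omega⟩
      rw [if_neg hcb] at this
      have := (ih b).symm.trans (by rw [this])
      exact this.symm

theorem pvOptFold_eq_pickMin (t : List String) : ∀ b : String,
    (t.foldl pvStepB (some b, pvRank pvSuffixes b)).1 = some (pvPickMin b t) := by
  induction t with
  | nil => intro b; rfl
  | cons x xs ih =>
    intro b
    simp only [List.foldl_cons, pvStepB, pvPickMin]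
    split_ifs with h
    · exact ih x
    · exact ih b

theorem pvFoldB_eq_hrefs_fold (links : List (List (String × String))) (init : Option String × Nat) :
    links.foldl
      (fun (st : Option String × Nat) link =>
        if (PySem.Dict.ofList link).get? "render" == some "image" then
          pvStepB st (((PySem.Dict.ofList link).get? "href").getD "")
        else st)
      init = (pvHrefs links).foldl pvStepB init := by
  unfold pvHrefs
  rw [List.foldl_map, List.foldl_filter]

-- ===== VERDICT (by name: the statement is the Claim_ definition above) =====
theorem pvPreRender (l : List (String × String))
    (h : (PySem.Dict.ofList l).getD "render" "?" = "image") :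
    (PySem.Dict.ofList l).get? "render" = some "image" := by
  rw [PySem.Dict.getD_eq_get?_getD] at h
  cases hg : (PySem.Dict.ofList l).get? "render" with
  | none => rw [hg] at h; exact absurd h (by decide)
  | some v =>
    rw [hg] at h
    simp only [Option.getD_some] at h
    subst h
    rfl

theorem pick_image_link_spec : Claim_equal_pick_image_link := by
  intro links _ hpre
  unfold Spec_pick_image_link
  obtain ⟨_, l, hl, hrender0⟩ := hpre
  have hrender := pvPreRender l hrender0
  have hne : pvHrefs links ≠ [] := by
    unfold pvHrefs
    simp only [ne_eq, List.map_eq_nil_iff, List.filter_eq_nil_iff]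
    intro hall
    exact absurd hrender (by simpa using hall l hl)
  have hA : pick_image_link links =
      (match pvLoopA pvSuffixes (pvHrefs links) with
       | some h => h
       | none => match pvHrefs links with | [] => "" | h0 :: _ => h0) := rfl
  have hB : pick_image_link_alt links =
      (match ((pvHrefs links).foldl pvStepB (none, pvSuffixes.length + 1)).1 with
       | some b => b | none => "") := by
    unfold pick_image_link_alt
    rw [pvFoldB_eq_hrefs_fold]
  rw [hA, hB]
  cases hh : pvHrefs links with
  | nil => exact absurd hh hne
  | cons h0 rest =>
    have hstep : pvStepB (none, pvSuffixes.length + 1) h0 = (some h0, pvRank pvSuffixes h0) := by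
      unfold pvStepB
      rw [if_pos]
      have := pvRank_le pvSuffixes h0
      omega
    rw [List.foldl_cons, hstep, pvOptFold_eq_pickMin]
    exact pvA_eq_pickMin rest h0
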